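-- pv_equiv track=rewrite | github.com/AlexisHBioinfo/Projet_Bio_Python | Test_sequence.py | isGene
-- ===== SOURCE A (Python) =====
-- def oneWord(seq,start,wlen): #return a piece with a lenght = wlen of the string seq from the index start
--     a=0
--     sequence=''
--     for i in range(len(seq)):
--         if i>=start and a<wlen :
--             a=a+1
--             sequence=sequence+str(seq[i])
--     return sequence
--
-- def isCodonStart(seq,pos): #return True if the string seq has start codon
--     codon=oneWord(seq,pos,3)
--     if codon in ('ATG','TTA','TTG','CTG','ATT','ATC','ATA','GTG'):
--         return True
--     else :
--         return False
--
-- def isCodonStop(seq,pos): #return True if seq has a stop codon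
--     codon=oneWord(seq,pos,3)
--     if codon=='TAA' or codon=='TAG':
--         return True
--     else :
--         return False
--
-- def isGene(seq): #return True if seq has start codon and stop codon modulo 3
--     wlen=len(seq)
--     for i in range(0,wlen,3):
--         if isCodonStart(seq,i)==True :
--             for j in range(i,wlen,3):
--                 if isCodonStop(seq,j)==True :
--                     return True
--     return False
-- ===== SOURCE B (Python) =====
-- # Single O(n) pass over in-frame codons via O(1) slicing: remember whether a
-- # start codon has been seen, return True at the first later in-frame stop codon.
-- START_CODONS = {'ATG', 'TTA', 'TTG', 'CTG', 'ATT', 'ATC', 'ATA', 'GTG'}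
-- STOP_CODONS = {'TAA', 'TAG'}
--
-- def isGene(seq):
--     seen_start = False
--     for i in range(0, len(seq) - 2, 3):
--         codon = seq[i:i+3]
--         if codon in START_CODONS:
--             seen_start = True
--         elif seen_start and codon in STOP_CODONS:
--             return True
--     return False
-- ===== Notes on version B (the rewrite author's own statement) =====
-- stated objective: faster
-- what changed: Replaces the char-by-char oneWord scan (O(n) per codon) inside nested in-frame loops with O(1) slices and a single pass that tracks whether a start codon has been seen and returns at the first later in-frame stop codon.
import Mathlib
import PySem

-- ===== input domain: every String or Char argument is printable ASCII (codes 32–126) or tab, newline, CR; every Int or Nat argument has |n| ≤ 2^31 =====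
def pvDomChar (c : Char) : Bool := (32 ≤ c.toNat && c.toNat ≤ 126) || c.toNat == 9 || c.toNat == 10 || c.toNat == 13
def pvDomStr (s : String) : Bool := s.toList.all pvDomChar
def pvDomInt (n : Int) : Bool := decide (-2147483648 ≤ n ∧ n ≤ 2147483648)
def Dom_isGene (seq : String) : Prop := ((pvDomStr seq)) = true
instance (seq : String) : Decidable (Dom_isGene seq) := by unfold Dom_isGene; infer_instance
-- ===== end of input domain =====

-- B replaces A's char-by-char oneWord extraction inside two nested in-frame loops by
-- O(1) slices and one pass with a seen-start flag (objective: faster).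

-- ===== PORT A =====
-- Python strings are carried as List Char (seq[i] -> PySem.List.pyGet?, always in range here,
-- so `.toList` appends exactly the one char Python appends).
def pvOneWord (cs : List Char) (start wlen : Int) : List Char :=
  ((PySem.List.pyRange 0 (cs.length : Int) 1).foldl
    (fun (st : Int × List Char) i =>
      if start ≤ i ∧ st.1 < wlen then (st.1 + 1, st.2 ++ (PySem.List.pyGet? cs i).toList)
      else st) (0, [])).2

def pvStartTuple : List (List Char) :=
  [['A','T','G'], ['T','T','A'], ['T','T','G'], ['C','T','G'],
   ['A','T','T'], ['A','T','C'], ['A','T','A'], ['G','T','G']]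

def pvIsCodonStart (cs : List Char) (pos : Int) : Bool :=
  if pvOneWord cs pos 3 ∈ pvStartTuple then true else false

def pvIsCodonStop (cs : List Char) (pos : Int) : Bool :=
  if pvOneWord cs pos 3 = ['T','A','A'] ∨ pvOneWord cs pos 3 = ['T','A','G'] then true else false

def isGene (seq : String) : Bool :=
  let cs := seq.toList
  let wlen : Int := cs.length
  (PySem.List.pyRange 0 wlen 3).any (fun i =>
    pvIsCodonStart cs i &&
      (PySem.List.pyRange i wlen 3).any (fun j => pvIsCodonStop cs j))

-- ===== PORT B =====
def pvStartSet : List (List Char) := pvStartTuple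
def pvStopSet : List (List Char) := [['T','A','A'], ['T','A','G']]

-- the for-loop of Source B with its early return, as structural recursion over the index list
def pvGo (cs : List Char) : List Int → Bool → Bool
  | [], _ => false
  | i :: rest, seen =>
    if PySem.List.slice cs (some i) (some (i + 3)) ∈ pvStartSet then pvGo cs rest true
    else if seen && decide (PySem.List.slice cs (some i) (some (i + 3)) ∈ pvStopSet) then true
    else pvGo cs rest seen

def isGene_alt (seq : String) : Bool :=
  let cs := seq.toList
  pvGo cs (PySem.List.pyRange 0 ((cs.length : Int) - 2) 3) false

-- ===== PRECONDITION & SPEC =====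
def Spec_isGene (seq : String) (out : Bool) : Prop := out = isGene_alt seq
instance (seq : String) (out : Bool) : Decidable (Spec_isGene seq out) := by unfold Spec_isGene; infer_instance

-- ===== CLAIM (what is proved, stated in full; the proofs are below) =====
def Claim_equal_isGene : Prop := ∀ (seq : String), Dom_isGene seq → Spec_isGene seq (isGene seq)

-- ===== LEMMAS AND PROOFS =====

-- step-3 range induction forms
lemma r3_nil (a b : Int) (h : b ≤ a) : PySem.List.pyRange a b 3 = [] := by
  rw [PySem.List.pyRange_of_pos a b (by norm_num)]
  simp [show ¬ a < b by omega]

lemma r3_cons (a b : Int) (h : a < b) : PySem.List.pyRange a b 3 = a :: PySem.List.pyRange (a + 3) b 3 := by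
  rw [PySem.List.pyRange_of_pos a b (by norm_num), PySem.List.pyRange_of_pos (a+3) b (by norm_num)]
  by_cases h2 : a + 3 < b
  · have e : ((b - a + 3 - 1) / 3).toNat = ((b - (a + 3) + 3 - 1) / 3).toNat + 1 := by omega
    simp only [if_pos h, if_pos h2, e, List.range_succ_eq_map, List.map_cons, List.map_map]
    congr 1
    · norm_num
    apply List.map_congr_left
    intro k _
    simp only [Function.comp_apply, Nat.succ_eq_add_one]
    push_cast
    ring
  · have e : ((b - a + 3 - 1) / 3).toNat = 1 := by omega
    simp [if_pos h, if_neg h2, e, List.range_succ]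

-- the fold inside pvOneWord, characterised (invariant: a = length of the accumulated piece)
lemma fold_inv (cs : List Char) (start wlen : Int) (hs : 0 ≤ start) (hw : 0 ≤ wlen) :
    ∀ m : Nat, m ≤ cs.length →
    ((List.range m).foldl
      (fun (st : Int × List Char) (k : Nat) =>
        if start ≤ (k : Int) ∧ st.1 < wlen then (st.1 + 1, st.2 ++ (PySem.List.pyGet? cs (k : Int)).toList)
        else st) (0, []))
    = ((((((cs.take m).drop start.toNat).take wlen.toNat).length : Int)),
        ((cs.take m).drop start.toNat).take wlen.toNat) := by
  intro m
  induction m with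
  | zero =>
    intro _
    simp [List.drop_eq_nil_of_le, List.take_nil]
  | succ m ih =>
    intro hm
    have hm' : m ≤ cs.length := by omega
    have hmlt : m < cs.length := by omega
    rw [List.range_succ, List.foldl_append, ih hm']
    simp only [List.foldl_cons, List.foldl_nil]
    have hget : PySem.List.pyGet? cs (m : Int) = some cs[m] := by
      simp [PySem.List.pyGet?_natCast, List.getElem?_eq_getElem hmlt]
    have htk : cs.take (m+1) = cs.take m ++ [cs[m]] := by
      rw [List.take_add_one, List.getElem?_eq_getElem hmlt]
      rfl
    set s := start.toNat with hsdef
    set w := wlen.toNat with hwdef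
    have hlen : (((cs.take m).drop s).take w).length = min w (m - s) := by
      simp only [List.length_take, List.length_drop]
      omega
    by_cases hc1 : start ≤ (m : Int)
    · have hsm : s ≤ m := by omega
      have hdr : (cs.take (m+1)).drop s = (cs.take m).drop s ++ [cs[m]] := by
        rw [htk, List.drop_append_of_le_length (by simp only [List.length_take]; omega)]
      by_cases hc2 : ((((cs.take m).drop s).take w).length : Int) < wlen
      · have hms : m - s < w := by omega
        rw [if_pos ⟨hc1, hc2⟩, hget]
        have hfull : ((cs.take m).drop s).take w = (cs.take m).drop s := by
          apply List.take_of_length_le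
          simp only [List.length_drop, List.length_take]
          omega
        have hstep : ((cs.take (m+1)).drop s).take w = ((cs.take m).drop s).take w ++ [cs[m]] := by
          rw [hdr, List.take_append, hfull,
              List.take_of_length_le (l := [cs[m]])
                (by simp only [List.length_cons, List.length_nil, List.length_drop, List.length_take]; omega)]
        rw [hstep]
        simp only [Option.toList_some, List.length_append, List.length_cons, List.length_nil,
          Prod.mk.injEq]
        push_cast
        simp
      · rw [if_neg (fun hh => hc2 hh.2)]
        have hstep : ((cs.take (m+1)).drop s).take w = ((cs.take m).drop s).take w := by
          rw [hdr, List.take_append_of_le_length (by simp only [List.length_drop, List.length_take]; omega)]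
        rw [hstep]
    · have hsm : m + 1 ≤ s := by omega
      rw [if_neg (fun hh => hc1 hh.1)]
      have e1 : (cs.take (m+1)).drop s = [] :=
        List.drop_eq_nil_of_le (by simp only [List.length_take]; omega)
      have e2 : (cs.take m).drop s = [] :=
        List.drop_eq_nil_of_le (by simp only [List.length_take]; omega)
      rw [e1, e2]

-- pvOneWord computes the clamped slice
lemma oneWord_eq (cs : List Char) (start wlen : Int) (hs : 0 ≤ start) (hw : 0 ≤ wlen) :
    pvOneWord cs start wlen = ((cs.drop start.toNat).take wlen.toNat) := by
  unfold pvOneWord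
  rw [PySem.List.pyRange_one, List.foldl_map]
  simp only [zero_add, Int.sub_zero, Int.toNat_natCast]
  rw [fold_inv cs start wlen hs hw cs.length le_rfl, List.take_length]

-- A's codon = B's codon
lemma codon_eq (cs : List Char) (i : Int) (h : 0 ≤ i) :
    PySem.List.slice cs (some i) (some (i + 3)) = pvOneWord cs i 3 := by
  rw [oneWord_eq cs i 3 h (by norm_num),
      PySem.List.slice_toNat cs h (by omega)]
  congr 1
  omega

-- every start/stop codon literal has length 3
lemma start_len : ∀ c ∈ pvStartTuple, c.length = 3 := by decide

-- a codon shorter than 3 chars is never a start nor a stop codon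
lemma short_not_start (cs : List Char) (i : Int) (h0 : 0 ≤ i)
    (h : (cs.length : Int) - 2 ≤ i) : pvIsCodonStart cs i = false := by
  unfold pvIsCodonStart
  rw [oneWord_eq cs i 3 h0 (by norm_num)]
  have hlen : ((cs.drop i.toNat).take 3).length < 3 := by
    simp only [List.length_take, List.length_drop]
    omega
  have hnm : ¬ ((cs.drop i.toNat).take 3) ∈ pvStartTuple := fun hmem => by
    rw [start_len _ hmem] at hlen
    omega
  simp [hnm]

lemma short_not_stop (cs : List Char) (i : Int) (h0 : 0 ≤ i)
    (h : (cs.length : Int) - 2 ≤ i) : pvIsCodonStop cs i = false := by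
  unfold pvIsCodonStop
  rw [oneWord_eq cs i 3 h0 (by norm_num)]
  have hlen : ((cs.drop i.toNat).take 3).length < 3 := by
    simp only [List.length_take, List.length_drop]
    omega
  have hnm : ¬ ((cs.drop i.toNat).take 3 = ['T','A','A'] ∨ (cs.drop i.toNat).take 3 = ['T','A','G']) := by
    rintro (hh | hh) <;> (rw [hh] at hlen; simp at hlen)
  simp [hnm]

-- a codon is never both a start and a stop codon
lemma start_stop_disjoint (cs : List Char) (i : Int) (h : pvIsCodonStart cs i = true) :
    pvIsCodonStop cs i = false := by
  unfold pvIsCodonStart at h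
  unfold pvIsCodonStop
  by_cases h1 : pvOneWord cs i 3 ∈ pvStartTuple
  · have hne : ¬ (pvOneWord cs i 3 = ['T','A','A'] ∨ pvOneWord cs i 3 = ['T','A','G']) := by
      rintro (e | e) <;> (rw [e] at h1; exact absurd h1 (by decide))
    simp [hne]
  · simp [h1] at h

-- B's codon tests agree with A's codon predicates (for 0 ≤ i)
lemma startB_iff (cs : List Char) (i : Int) (h : 0 ≤ i) :
    PySem.List.slice cs (some i) (some (i + 3)) ∈ pvStartSet ↔ pvIsCodonStart cs i = true := by
  rw [codon_eq cs i h]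
  unfold pvIsCodonStart pvStartSet
  by_cases hm : pvOneWord cs i 3 ∈ pvStartTuple <;> simp [hm]

lemma stopB_eq (cs : List Char) (i : Int) (h : 0 ≤ i) :
    decide (PySem.List.slice cs (some i) (some (i + 3)) ∈ pvStopSet) = pvIsCodonStop cs i := by
  rw [codon_eq cs i h]
  unfold pvIsCodonStop pvStopSet
  by_cases h1 : pvOneWord cs i 3 = ['T','A','A'] <;>
    by_cases h2 : pvOneWord cs i 3 = ['T','A','G'] <;>
      simp [h1, h2]

-- main loop correspondence, by fuel induction on the remaining range
lemma go_eq (cs : List Char) : ∀ (t : Nat) (a : Int) (seen : Bool), 0 ≤ a →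
    (((cs.length : Int) - a).toNat ≤ t) →
    pvGo cs (PySem.List.pyRange a ((cs.length : Int) - 2) 3) seen
    = ((seen && (PySem.List.pyRange a (cs.length : Int) 3).any (fun j => pvIsCodonStop cs j)) ||
       (PySem.List.pyRange a (cs.length : Int) 3).any (fun i =>
          pvIsCodonStart cs i &&
            (PySem.List.pyRange i (cs.length : Int) 3).any (fun j => pvIsCodonStop cs j))) := by
  intro t
  induction t with
  | zero =>
    intro a seen ha hle
    rw [r3_nil a ((cs.length : Int) - 2) (by omega), r3_nil a (cs.length : Int) (by omega)]
    simp [pvGo]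
  | succ t ih =>
    intro a seen ha hle
    by_cases hlt : a < (cs.length : Int)
    · by_cases h2 : a < (cs.length : Int) - 2
      · -- full codon at a
        rw [r3_cons a ((cs.length : Int) - 2) h2, r3_cons a (cs.length : Int) hlt]
        simp only [pvGo, List.any_cons]
        rw [r3_cons a (cs.length : Int) hlt, List.any_cons, stopB_eq cs a ha]
        cases hst : pvIsCodonStart cs a with
        | true =>
          rw [if_pos ((startB_iff cs a ha).mpr hst)]
          have hsp := start_stop_disjoint cs a hst
          rw [ih (a + 3) true (by omega) (by omega)]
          simp only [hsp, Bool.false_or, Bool.true_and]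
          cases seen <;>
            cases hS : (PySem.List.pyRange (a+3) (cs.length : Int) 3).any (fun j => pvIsCodonStop cs j) <;>
              simp
        | false =>
          rw [if_neg (fun hh => by rw [(startB_iff cs a ha).mp hh] at hst; exact Bool.noConfusion hst)]
          simp only [Bool.false_and, Bool.false_or]
          cases hsp : pvIsCodonStop cs a with
          | true =>
            cases seen
            · simp only [Bool.false_and, Bool.false_or, if_neg Bool.false_ne_true]
              rw [ih (a + 3) false (by omega) (by omega)]
              simp
            · simp
          | false =>
            simp only [Bool.and_false, Bool.false_or, if_neg Bool.false_ne_true]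
            rw [ih (a + 3) seen (by omega) (by omega)]
      · -- tail codon, shorter than 3 chars: both sides see nothing new
        have hs := short_not_start cs a ha (by omega)
        have hp := short_not_stop cs a ha (by omega)
        rw [r3_nil a ((cs.length : Int) - 2) (by omega),
            r3_cons a (cs.length : Int) hlt, r3_nil (a + 3) (cs.length : Int) (by omega)]
        simp only [pvGo, List.any_cons, List.any_nil]
        rw [r3_cons a (cs.length : Int) hlt, r3_nil (a + 3) (cs.length : Int) (by omega)]
        simp [hs, hp]
    · rw [r3_nil a ((cs.length : Int) - 2) (by omega), r3_nil a (cs.length : Int) (by omega)]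
      simp [pvGo]

-- ===== VERDICT (by name: the statement is the Claim_ definition above) =====
theorem isGene_spec : Claim_equal_isGene := by
  intro seq _
  unfold Spec_isGene isGene isGene_alt
  rw [go_eq seq.toList ((seq.toList.length : Int)).toNat 0 false (le_refl 0) (by omega)]
  simp
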